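-- pv_equiv track=rewrite | github.com/ganjisriver/TIL | 알고리즘/co-re-study/23_07_2nd/프로그래머스 불량 사용자.py | solution
-- ===== SOURCE A (Python) =====
-- from itertools import combinations, permutations
--
-- def is_banned(combi_users, banned_id):
--     for i in range(len(banned_id)):
--         if len(combi_users[i]) != len(banned_id[i]):
--             return False
--
--         for j in range(len(combi_users[i])):
--             if banned_id[i][j] == "*" or (banned_id[i][j] == combi_users[i][j]):
--                 pass
--             else:
--                 return False
--     return True
--
-- def solution(user_id, banned_id):
--     combi_list = list(combinations(user_id, len(banned_id)))
--     ban_list = set()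
--     cnt = 0
--     for combi_users in combi_list:
--         if not is_banned(combi_users, banned_id):
--             pass
--         else:
--             cnt += 1
--             combi_user_set = set(combi_users)
--             if combi_user_set not in ban_list:
--                 ban_list.add(combi_users)
--     answer = len(ban_list)
--     return answer
-- ===== SOURCE B (Python) =====
-- def solution(user_id, banned_id):
--     # Counting suffix DP with head-contribution dedup; only the feasible band of
--     # columns j (k-(n-i) <= j <= i) is computed, rows kept as sparse dicts.
--     def matches(u, p):
--         return len(u) == len(p) and all(pc == '*' or pc == uc for pc, uc in zip(p, u))
--
--     n, k = len(user_id), len(banned_id)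
--     prev = {k: 1}  # row n: only the empty pattern suffix is matched (by the empty tuple)
--     H = {}         # H[(u, j)] = number of counted tuples with head u at column j
--     for i in range(n - 1, -1, -1):
--         cur = {}
--         lo = max(0, k - (n - i))
--         hi = min(i, k)
--         for j in range(lo, hi + 1):
--             if j == k:
--                 cur[j] = 1
--             else:
--                 v = prev.get(j, 0)
--                 u = user_id[i]
--                 if matches(u, banned_id[j]):
--                     v += prev.get(j + 1, 0) - H.get((u, j), 0)
--                     H[(u, j)] = prev.get(j + 1, 0)
--                 cur[j] = v
--         prev = cur
--     return prev.get(0, 0)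
-- ===== Notes on version B (the rewrite author's own statement) =====
-- stated objective: alternative
-- what changed: Instead of materialising all C(n,k) index combinations, filtering them and deduplicating through a set, B counts the distinct matching tuples directly with a right-to-left suffix dynamic program over the feasible band of columns, subtracting each user's previous head contribution to deduplicate.
import Mathlib
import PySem

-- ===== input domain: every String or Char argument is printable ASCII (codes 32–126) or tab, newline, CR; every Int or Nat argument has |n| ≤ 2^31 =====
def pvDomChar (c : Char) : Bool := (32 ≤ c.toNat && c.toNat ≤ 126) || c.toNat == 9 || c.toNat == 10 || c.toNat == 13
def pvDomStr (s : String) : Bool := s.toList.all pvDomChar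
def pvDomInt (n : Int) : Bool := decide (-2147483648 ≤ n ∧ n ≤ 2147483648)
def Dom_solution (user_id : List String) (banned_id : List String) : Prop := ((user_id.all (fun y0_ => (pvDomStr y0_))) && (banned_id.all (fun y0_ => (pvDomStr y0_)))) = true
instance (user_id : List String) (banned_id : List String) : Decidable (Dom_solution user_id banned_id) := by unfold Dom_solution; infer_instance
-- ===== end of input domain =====

-- B replaces A's generate-all-combinations-then-filter-then-dedup with a counting
-- suffix dynamic program (head-contribution dedup) that never materialises the tuples (objective: alternative).

-- ===== PORT A =====
-- inner loop of is_banned: for j in range(len(combi_users[i])), pattern char '*' or equal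
def pvMatchChars : List Char → List Char → Bool
  | [], _ => true
  | _ :: _, [] => false  -- Python IndexError on banned_id[i][j]; unreachable: is_banned checks the lengths equal first
  | u :: us, b :: bs => if b = '*' || b = u then pvMatchChars us bs else false

-- is_banned: loop i over banned_id, positionwise length check then char loop
def isBanned : List String → List String → Bool
  | _, [] => true
  | [], _ :: _ => false  -- Python IndexError on combi_users[i]; unreachable: combinations have length len(banned_id)
  | u :: us, b :: bs =>
    if PySem.Str.len u ≠ PySem.Str.len b then false
    else if pvMatchChars u.toList b.toList then isBanned us bs else false

-- itertools.combinations(user_id, k), tuples in the original (lexicographic-by-index) order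
def pvCombinations : List String → Nat → List (List String)
  | _, 0 => [[]]
  | [], _ + 1 => []
  | u :: us, k + 1 => ((pvCombinations us k).map (fun c => u :: c)) ++ pvCombinations us (k + 1)

-- 'combi_user_set not in ban_list': a set tested for membership in a set of tuples is
-- hashed as a frozenset, and a frozenset never equals a tuple, so the test never finds it
def pvFrozensetEqTuple (_s : PySem.Set String) (_t : List String) : Bool := false

def solution (user_id : List String) (banned_id : List String) : Int :=
  let combi_list := pvCombinations user_id (banned_id.length)
  let st := combi_list.foldl
    (fun (st : PySem.Set (List String) × Int) combi_users =>
      if ¬ (isBanned combi_users banned_id) then st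
      else
        let cnt := st.2 + 1
        let combi_user_set := PySem.Set.ofList combi_users
        if ¬ (st.1.any (fun t => pvFrozensetEqTuple combi_user_set t)) then
          (PySem.Set.add st.1 combi_users, cnt)
        else (st.1, cnt))
    (PySem.Set.empty, 0)
  (st.1.length : Int)

-- ===== PORT B =====
def pvMatchB (u p : String) : Bool :=
  PySem.Str.len u == PySem.Str.len p &&
    (p.toList.zip u.toList).all (fun pu => pu.1 = '*' || pu.1 = pu.2)

-- loop body for one column j (the state st2 is (cur, H); prev is the finished row below)
def pvCell (user_id banned_id : List String) (k : Int) (prev : PySem.Dict Int Int) (i : Int)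
    (st2 : PySem.Dict Int Int × PySem.Dict (String × Int) Int) (j : Int) :
    PySem.Dict Int Int × PySem.Dict (String × Int) Int :=
  if j == k then (PySem.Dict.insert st2.1 j 1, st2.2)
  else
    let v := PySem.Dict.getD prev j 0
    let u := PySem.List.pyGetD user_id i ""
    if pvMatchB u (PySem.List.pyGetD banned_id j "") then
      let v := v + PySem.Dict.getD prev (j + 1) 0 - PySem.Dict.getD st2.2 (u, j) 0
      (PySem.Dict.insert st2.1 j v,
       PySem.Dict.insert st2.2 (u, j) (PySem.Dict.getD prev (j + 1) 0))
    else (PySem.Dict.insert st2.1 j v, st2.2)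

-- loop body for one row i: fresh cur = {}, columns j from lo to hi
def pvRowStep (user_id banned_id : List String) (n k : Int)
    (st : PySem.Dict Int Int × PySem.Dict (String × Int) Int) (i : Int) :
    PySem.Dict Int Int × PySem.Dict (String × Int) Int :=
  let lo := max 0 (k - (n - i))
  let hi := min i k
  (PySem.List.pyRange lo (hi + 1) 1).foldl
    (pvCell user_id banned_id k st.1 i) (PySem.Dict.empty, st.2)

def solution_alt (user_id : List String) (banned_id : List String) : Int :=
  let n : Int := PySem.List.len user_id
  let k : Int := PySem.List.len banned_id
  let prev0 : PySem.Dict Int Int := PySem.Dict.insert PySem.Dict.empty k 1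
  let st := (PySem.List.pyRange (n - 1) (-1) (-1)).foldl
    (pvRowStep user_id banned_id n k) (prev0, PySem.Dict.empty)
  PySem.Dict.getD st.1 0 0

-- ===== PRECONDITION & SPEC =====
def Spec_solution (user_id : List String) (banned_id : List String) (out : Int) : Prop := out = solution_alt user_id banned_id
instance (user_id : List String) (banned_id : List String) (out : Int) : Decidable (Spec_solution user_id banned_id out) := by unfold Spec_solution; infer_instance

-- ===== CLAIM (what is proved, stated in full; the proofs are below) =====
def Claim_equal_solution : Prop := ∀ (user_id : List String) (banned_id : List String), Dom_solution user_id banned_id → Spec_solution user_id banned_id (solution user_id banned_id)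
-- ===== LEMMAS AND PROOFS =====

-- the loop body of A's fold, named for the proofs (definitionally the lambda in `solution`)
def pvStepA (banned : List String) (st : PySem.Set (List String) × Int)
    (combi_users : List String) : PySem.Set (List String) × Int :=
  if ¬ (isBanned combi_users banned) then st
  else
    let cnt := st.2 + 1
    let combi_user_set := PySem.Set.ofList combi_users
    if ¬ (st.1.any (fun t => pvFrozensetEqTuple combi_user_set t)) then
      (PySem.Set.add st.1 combi_users, cnt)
    else (st.1, cnt)

theorem pv_mem_foldl_add_id (l : List (List String)) (s : PySem.Set (List String))
    (y : List String) :
    y ∈ l.foldl (fun r t => PySem.Set.add r t) s ↔ y ∈ s ∨ y ∈ l := by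
  induction l generalizing s with
  | nil => simp
  | cons x xs ih => simp [List.foldl_cons, ih, PySem.Set.mem_add]; tauto

theorem pv_mem_foldl_add_cons (u : String) (l : List (List String))
    (s : PySem.Set (List String)) (y : List String) :
    y ∈ l.foldl (fun r t => PySem.Set.add r (u :: t)) s ↔ y ∈ s ∨ ∃ b ∈ l, y = u :: b := by
  induction l generalizing s with
  | nil => simp
  | cons x xs ih => simp [List.foldl_cons, ih, PySem.Set.mem_add]; tauto

theorem pv_nodup_foldl_add_id (l : List (List String)) (s : PySem.Set (List String))
    (h : s.Nodup) : (l.foldl (fun r t => PySem.Set.add r t) s).Nodup := by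
  induction l generalizing s with
  | nil => exact h
  | cons x xs ih => exact ih _ (PySem.Set.nodup_add s x h)

theorem pv_nodup_foldl_add_cons (u : String) (l : List (List String))
    (s : PySem.Set (List String)) (h : s.Nodup) :
    (l.foldl (fun r t => PySem.Set.add r (u :: t)) s).Nodup := by
  induction l generalizing s with
  | nil => exact h
  | cons x xs ih => exact ih _ (PySem.Set.nodup_add s (u :: x) h)

theorem pv_zipall_eq (a b : List Char) (h : a.length = b.length) :
    ((b.zip a).all fun pu => pu.1 = '*' || pu.1 = pu.2) = pvMatchChars a b := by
  induction a generalizing b with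
  | nil => cases b <;> simp_all [pvMatchChars]
  | cons c cs ih =>
    cases b with
    | nil => simp at h
    | cons d ds =>
      simp only [List.zip_cons_cons, List.all_cons, pvMatchChars]
      rw [ih ds (by simpa using h)]
      by_cases h1 : (d = '*' ∨ d = c) <;> simp_all

theorem pv_isBanned_cons (u p : String) (t ps : List String) :
    isBanned (u :: t) (p :: ps) = (pvMatchB u p && isBanned t ps) := by
  have hlen : PySem.Str.len u = (u.length : Int) ∧ PySem.Str.len p = (p.length : Int) := by
    constructor <;> simp
  simp only [isBanned, pvMatchB, hlen.1, hlen.2]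
  by_cases h : u.length = p.length
  · have htl : u.toList.length = p.toList.length := by
      rw [String.length_toList, String.length_toList, h]
    rw [pv_zipall_eq u.toList p.toList htl]
    simp only [h, ne_eq, not_true_eq_false, if_false, beq_self_eq_true,
      Bool.true_and]
    cases hmc : pvMatchChars u.toList p.toList <;> simp
  · have : ((u.length : Int) == (p.length : Int)) = false := by
      simp [beq_eq_false_iff_ne]; exact_mod_cast h
    simp only [ne_eq, Int.natCast_inj, h, not_false_eq_true, if_true, this, Bool.false_and]

-- the DP cell value: pvS us ps = row entry for pattern suffix ps after processing user suffix us
def pvS : List String → List String → PySem.Set (List String)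
  | [], [] => PySem.Set.add PySem.Set.empty []
  | [], _ :: _ => PySem.Set.empty
  | _ :: _, [] => PySem.Set.add PySem.Set.empty []
  | u :: us, p :: ps =>
    let cell0 := PySem.Set.ofList (pvS us (p :: ps))
    if pvMatchB u p then (pvS us ps).foldl (fun r t => PySem.Set.add r (u :: t)) cell0
    else cell0

-- membership in the DP cells
theorem pv_mem_S (x : List String) :
    ∀ us ps : List String,
      x ∈ pvS us ps ↔ x ∈ pvCombinations us ps.length ∧ isBanned x ps = true := by
  intro us
  induction us generalizing x with
  | nil =>
    intro ps
    cases ps with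
    | nil =>
      simp only [pvS, pvCombinations, List.length_nil]
      simp [PySem.Set.empty, PySem.Set.add, PySem.Set.contains]
      rintro rfl; rfl
    | cons p ps => simp [pvS, pvCombinations, PySem.Set.empty]
  | cons u us ih =>
    intro ps
    cases ps with
    | nil =>
      simp only [pvS, pvCombinations, List.length_nil]
      simp [PySem.Set.empty, PySem.Set.add, PySem.Set.contains]
      rintro rfl; rfl
    | cons p ps =>
      simp only [pvS, List.length_cons, pvCombinations]
      constructor
      · intro hx
        by_cases hm : pvMatchB u p = true
        · simp only [hm, if_pos] at hx
          rw [pv_mem_foldl_add_cons] at hx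
          rcases hx with h0 | ⟨t, ht, rfl⟩
          · rw [PySem.Set.mem_ofList, ih] at h0
            exact ⟨by simp only [List.mem_append]; exact Or.inr h0.1, h0.2⟩
          · rw [ih] at ht
            refine ⟨by simp only [List.mem_append, List.mem_map]; exact Or.inl ⟨t, ht.1, rfl⟩, ?_⟩
            rw [pv_isBanned_cons, hm, ht.2]
            rfl
        · simp only [Bool.not_eq_true] at hm
          simp only [hm, Bool.false_eq_true, if_false] at hx
          rw [PySem.Set.mem_ofList, ih] at hx
          exact ⟨by simp only [List.mem_append]; exact Or.inr hx.1, hx.2⟩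
      · rintro ⟨hmem, hban⟩
        simp only [List.mem_append, List.mem_map] at hmem
        rcases hmem with ⟨t, ht, rfl⟩ | hmem
        · rw [pv_isBanned_cons, Bool.and_eq_true] at hban
          simp only [hban.1, if_pos]
          rw [pv_mem_foldl_add_cons]
          exact Or.inr ⟨t, (ih t ps).mpr ⟨ht, hban.2⟩, rfl⟩
        · have hx : x ∈ PySem.Set.ofList (pvS us (p :: ps)) := by
            rw [PySem.Set.mem_ofList]
            exact (ih x (p :: ps)).mpr ⟨by simpa using hmem, hban⟩
          split_ifs
          · rw [pv_mem_foldl_add_cons]; exact Or.inl hx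
          · exact hx

theorem pv_nodup_S : ∀ us ps : List String, (pvS us ps).Nodup := by
  intro us
  induction us with
  | nil =>
    intro ps
    cases ps with
    | nil => simp [pvS, PySem.Set.empty, PySem.Set.add, PySem.Set.contains]
    | cons p ps => simp [pvS, PySem.Set.empty]
  | cons u us ih =>
    intro ps
    cases ps with
    | nil => simp [pvS, PySem.Set.empty, PySem.Set.add, PySem.Set.contains]
    | cons p ps =>
      simp only [pvS]
      split_ifs
      · exact pv_nodup_foldl_add_cons _ _ _ (PySem.Set.nodup_ofList _)
      · exact PySem.Set.nodup_ofList _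

-- A's fold: the frozenset membership test is always false, so every matching tuple is Set.add'ed
theorem pv_foldA (banned : List String) (l : List (List String)) :
    ∀ (s : PySem.Set (List String)) (cnt : Int),
      (l.foldl (pvStepA banned) (s, cnt)).1
        = (l.filter (fun c => isBanned c banned)).foldl (fun r t => PySem.Set.add r t) s := by
  induction l with
  | nil => intro s cnt; rfl
  | cons c cs ih =>
    intro s cnt
    rw [List.foldl_cons, List.filter_cons]
    by_cases hc : isBanned c banned = true
    · have h1 : pvStepA banned (s, cnt) c = (PySem.Set.add s c, cnt + 1) := by
        simp [pvStepA, hc, pvFrozensetEqTuple]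
      rw [h1, if_pos hc, List.foldl_cons]
      exact ih _ _
    · have h1 : pvStepA banned (s, cnt) c = (s, cnt) := by simp [pvStepA, hc]
      rw [h1, if_neg hc]
      exact ih _ _


-- ===== counting lemmas for B =====

-- Int-valued cardinalities of the matching-tuple sets
def pvC (us ps : List String) : Int := ((pvS us ps).length : Int)
def pvHC (u : String) (us ps : List String) : Int :=
  (((pvS us ps).filter (fun t => t.head? == some u)).length : Int)

theorem pv_combos_nil_of_lt : ∀ (us : List String) (m : Nat), us.length < m → pvCombinations us m = [] := by
  intro us
  induction us with
  | nil => intro m hm; cases m with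
    | zero => omega
    | succ m => rfl
  | cons u us ih =>
    intro m hm
    cases m with
    | zero => omega
    | succ m =>
      simp only [pvCombinations]
      rw [ih m (by simpa using hm), ih (m+1) (by simp at hm ⊢; omega)]
      rfl

theorem pv_mem_combos_iff (x : List String) : ∀ (us : List String) (m : Nat),
    x ∈ pvCombinations us m ↔ x.Sublist us ∧ x.length = m := by
  intro us
  induction us generalizing x with
  | nil =>
    intro m
    cases m with
    | zero => simp [pvCombinations, List.sublist_nil, List.length_eq_zero_iff]
    | succ m =>
      simp only [pvCombinations, List.not_mem_nil, false_iff, not_and]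
      intro hs
      rw [List.sublist_nil] at hs
      subst hs; simp
  | cons u us ih =>
    intro m
    cases m with
    | zero =>
      simp only [pvCombinations, List.mem_singleton]
      constructor
      · rintro rfl; exact ⟨List.nil_sublist _, rfl⟩
      · rintro ⟨_, hl⟩; exact List.length_eq_zero_iff.mp hl
    | succ m =>
      simp only [pvCombinations, List.mem_append, List.mem_map, ih]
      constructor
      · rintro (⟨t, ⟨hts, htl⟩, rfl⟩ | ⟨hs, hl⟩)
        · exact ⟨List.cons_sublist_cons.mpr hts, by simp [htl]⟩
        · exact ⟨hs.cons _, hl⟩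
      · rintro ⟨hs, hl⟩
        rcases List.sublist_cons_iff.mp hs with h | ⟨r, rfl, hr⟩
        · exact Or.inr ⟨h, hl⟩
        · exact Or.inl ⟨r, ⟨hr, by simpa using hl⟩, rfl⟩

theorem pvS_nil_pattern (us : List String) : pvS us [] = [[]] := by
  cases us <;> rfl

theorem pvS_eq_nil_of_short (us ps : List String) (h : us.length < ps.length) : pvS us ps = [] := by
  rw [List.eq_nil_iff_forall_not_mem]
  intro x hx
  rw [pv_mem_S] at hx
  rw [pv_combos_nil_of_lt us ps.length h] at hx
  simp at hx

theorem pvC_nil_pattern (us : List String) : pvC us [] = 1 := by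
  simp [pvC, pvS_nil_pattern]

theorem pvC_short (us ps : List String) (h : us.length < ps.length) : pvC us ps = 0 := by
  simp [pvC, pvS_eq_nil_of_short us ps h]

theorem pvHC_short (u : String) (us ps : List String) (h : us.length < ps.length) :
    pvHC u us ps = 0 := by
  simp [pvHC, pvS_eq_nil_of_short us ps h]

-- without a head match the recursion step leaves the set literally unchanged
theorem pvS_cons_of_not_match (u p : String) (us ps : List String) (h : pvMatchB u p = false) :
    pvS (u :: us) (p :: ps) = pvS us (p :: ps) := by
  simp only [pvS, h, Bool.false_eq_true, if_false]
  exact PySem.Set.ofList_eq_self_of_nodup _ (pv_nodup_S us (p :: ps))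

-- length of the fold that adds u-headed tuples
theorem pv_len_fold_addcons (u : String) : ∀ (l : List (List String)) (s : PySem.Set (List String)),
    l.Nodup →
    (l.foldl (fun r t => PySem.Set.add r (u :: t)) s).length
      = s.length + (l.filter (fun t => decide ((u :: t) ∉ s))).length := by
  intro l
  induction l with
  | nil => intro s _; simp
  | cons t l ih =>
    intro s hn
    rw [List.nodup_cons] at hn
    simp only [List.foldl_cons, List.filter_cons]
    by_cases hm : (u :: t) ∈ s
    · rw [PySem.Set.add_of_mem hm]
      simp only [hm, not_true_eq_false, decide_false]
      exact ih s hn.2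
    · rw [PySem.Set.add_of_not_mem hm]
      simp only [hm, not_false_eq_true, decide_true, if_true]
      rw [ih (s ++ [u :: t]) hn.2, List.length_append]
      have : l.filter (fun t' => decide ((u :: t') ∉ s ++ [u :: t]))
           = l.filter (fun t' => decide ((u :: t') ∉ s)) := by
        apply List.filter_congr
        intro t' ht'
        have : t' ≠ t := fun h => hn.1 (h ▸ ht')
        simp [List.mem_append, this]
      rw [this]
      simp only [List.length_cons, List.length_nil]
      omega

-- the overlap between added u-headed tuples and the old set is its u-headed part
-- every u-headed member of pvS us (p :: ps) has its tail in pvS us ps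
theorem pv_head_mem_tail (u p : String) (us ps t : List String)
    (ht : (u :: t) ∈ pvS us (p :: ps)) : t ∈ pvS us ps := by
  rw [pv_mem_S] at ht ⊢
  rcases ht with ⟨hc, hb⟩
  rw [pv_mem_combos_iff] at hc
  rw [pv_isBanned_cons, Bool.and_eq_true] at hb
  rw [pv_mem_combos_iff]
  refine ⟨⟨?_, ?_⟩, hb.2⟩
  · exact (List.sublist_cons_self u t).trans hc.1
  · simpa using hc.2

theorem pv_overlap (u p : String) (us ps : List String) (h : pvMatchB u p = true) :
    ((pvS us ps).filter (fun t => decide ((u :: t) ∈ pvS us (p :: ps)))).length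
      = ((pvS us (p :: ps)).filter (fun t => t.head? == some u)).length := by
  have hperm : List.Perm
      (((pvS us ps).filter (fun t => decide ((u :: t) ∈ pvS us (p :: ps)))).map (fun t => u :: t))
      ((pvS us (p :: ps)).filter (fun t => t.head? == some u)) := by
    rw [List.perm_ext_iff_of_nodup]
    · intro x
      simp only [List.mem_map, List.mem_filter, decide_eq_true_eq, beq_iff_eq]
      constructor
      · rintro ⟨t, ⟨_, hmem⟩, rfl⟩
        exact ⟨hmem, rfl⟩
      · rintro ⟨hx, hhead⟩
        cases x with
        | nil => simp at hhead
        | cons y t =>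
          simp only [List.head?_cons, Option.some_inj] at hhead
          rcases hhead with rfl
          exact ⟨t, ⟨pv_head_mem_tail y p us ps t hx, hx⟩, rfl⟩
    · have hinj : Function.Injective (fun t : List String => u :: t) :=
        fun a b hab => by simpa using hab
      exact List.Nodup.map hinj (List.Nodup.filter _ (pv_nodup_S us ps))
    · exact List.Nodup.filter _ (pv_nodup_S us (p :: ps))
  simpa using hperm.length_eq

-- the main counting recurrences
-- the unfolded form of the matching recursion step
theorem pvS_cons_of_match (u p : String) (us ps : List String) (h : pvMatchB u p = true) :
    pvS (u :: us) (p :: ps)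
      = (pvS us ps).foldl (fun r t => PySem.Set.add r (u :: t)) (pvS us (p :: ps)) := by
  simp only [pvS, h, if_true]
  rw [PySem.Set.ofList_eq_self_of_nodup _ (pv_nodup_S us (p :: ps))]

theorem pvC_cons_match (u p : String) (us ps : List String) (h : pvMatchB u p = true) :
    pvC (u :: us) (p :: ps) = pvC us (p :: ps) + pvC us ps - pvHC u us (p :: ps) := by
  have hlen := pv_len_fold_addcons u (pvS us ps) (pvS us (p :: ps)) (pv_nodup_S us ps)
  have hsplit : (pvS us ps).length
      = ((pvS us ps).filter (fun t => decide ((u :: t) ∈ pvS us (p :: ps)))).length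
        + ((pvS us ps).filter (fun t => !decide ((u :: t) ∈ pvS us (p :: ps)))).length :=
    List.length_eq_length_filter_add _
  have hov := pv_overlap u p us ps h
  have hnot : ((pvS us ps).filter (fun t => !decide ((u :: t) ∈ pvS us (p :: ps))))
      = ((pvS us ps).filter (fun t => decide ((u :: t) ∉ pvS us (p :: ps)))) := by
    apply List.filter_congr
    intro t _
    by_cases hm : (u :: t) ∈ pvS us (p :: ps) <;> simp [hm]
  rw [hnot] at hsplit
  unfold pvC pvHC
  rw [pvS_cons_of_match u p us ps h, hlen]
  omega

theorem pvC_cons_not_match (u p : String) (us ps : List String) (h : pvMatchB u p = false) :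
    pvC (u :: us) (p :: ps) = pvC us (p :: ps) := by
  simp [pvC, pvS_cons_of_not_match u p us ps h]

theorem pvHC_cons_match_self (u p : String) (us ps : List String) (h : pvMatchB u p = true) :
    pvHC u (u :: us) (p :: ps) = pvC us ps := by
  unfold pvHC pvC
  congr 1
  have hperm : List.Perm
      ((pvS (u :: us) (p :: ps)).filter (fun t => t.head? == some u))
      ((pvS us ps).map (fun t => u :: t)) := by
    rw [List.perm_ext_iff_of_nodup]
    · intro x
      rw [pvS_cons_of_match u p us ps h]
      simp only [List.mem_filter, List.mem_map, beq_iff_eq]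
      rw [pv_mem_foldl_add_cons]
      constructor
      · rintro ⟨hor | ⟨t, ht, rfl⟩, hhead⟩
        · cases x with
          | nil => simp at hhead
          | cons y t =>
            simp only [List.head?_cons, Option.some_inj] at hhead
            rcases hhead with rfl
            exact ⟨t, pv_head_mem_tail y p us ps t hor, rfl⟩
        · exact ⟨t, ht, rfl⟩
      · rintro ⟨t, ht, rfl⟩
        exact ⟨Or.inr ⟨t, ht, rfl⟩, rfl⟩
    · exact List.Nodup.filter _
        (by rw [pvS_cons_of_match u p us ps h]
            exact pv_nodup_foldl_add_cons _ _ _ (pv_nodup_S us (p :: ps)))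
    · exact List.Nodup.map (fun a b hab => by simpa using hab) (pv_nodup_S us ps)
  simpa using hperm.length_eq

theorem pvHC_cons_match_other (u' u p : String) (us ps : List String) (h : pvMatchB u p = true)
    (hne : u' ≠ u) : pvHC u' (u :: us) (p :: ps) = pvHC u' us (p :: ps) := by
  unfold pvHC
  congr 1
  have hperm : List.Perm
      ((pvS (u :: us) (p :: ps)).filter (fun t => t.head? == some u'))
      ((pvS us (p :: ps)).filter (fun t => t.head? == some u')) := by
    rw [List.perm_ext_iff_of_nodup]
    · intro x
      rw [pvS_cons_of_match u p us ps h]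
      simp only [List.mem_filter, beq_iff_eq]
      rw [pv_mem_foldl_add_cons]
      constructor
      · rintro ⟨hor | ⟨t, _, rfl⟩, hhead⟩
        · exact ⟨hor, hhead⟩
        · simp only [List.head?_cons, Option.some_inj] at hhead
          exact absurd hhead.symm hne
      · rintro ⟨hx, hhead⟩
        exact ⟨Or.inl hx, hhead⟩
    · exact List.Nodup.filter _
        (by rw [pvS_cons_of_match u p us ps h]
            exact pv_nodup_foldl_add_cons _ _ _ (pv_nodup_S us (p :: ps)))
    · exact List.Nodup.filter _ (pv_nodup_S us (p :: ps))
  simpa using hperm.length_eq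

theorem pvHC_cons_not_match (u' u p : String) (us ps : List String) (h : pvMatchB u p = false) :
    pvHC u' (u :: us) (p :: ps) = pvHC u' us (p :: ps) := by
  simp [pvHC, pvS_cons_of_not_match u p us ps h]

-- ===== loop invariants =====

def pvInvRow (us ps : List String) (r : Nat) (prev : PySem.Dict Int Int) : Prop :=
  ∀ j : Nat, j ≤ ps.length → j ≤ r → prev.getD (j : Int) 0 = pvC (us.drop r) (ps.drop j)

def pvInvH (us ps : List String) (r : Nat) (H : PySem.Dict (String × Int) Int) : Prop :=
  ∀ (u : String) (j : Nat), j < ps.length → j ≤ r →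
    H.getD (u, (j : Int)) 0 = pvHC u (us.drop r) (ps.drop j)

-- partial-row invariants while the inner loop has processed columns [lo, jc)
def pvInvCur (us ps : List String) (r : Nat) (jc : Int) (cur : PySem.Dict Int Int) : Prop :=
  ∀ j : Int, cur.getD j 0 =
    if max 0 ((ps.length : Int) - ((us.length : Int) - (r : Int))) ≤ j ∧ j < jc then
      pvC (us.drop r) (ps.drop j.toNat)
    else 0

def pvInvHmix (us ps : List String) (r : Nat) (jc : Int) (H : PySem.Dict (String × Int) Int) : Prop :=
  ∀ (u : String) (j : Nat), j < ps.length → j ≤ r →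
    H.getD (u, (j : Int)) 0 =
      if (j : Int) < jc then pvHC u (us.drop r) (ps.drop j)
      else pvHC u (us.drop (r + 1)) (ps.drop j)

theorem pv_inner (us ps : List String) (r : Nat) (hr : r < us.length)
    (prev : PySem.Dict Int Int) (hrow : pvInvRow us ps (r + 1) prev) :
    ∀ (f : Nat) (jc : Int) (cur : PySem.Dict Int Int) (H : PySem.Dict (String × Int) Int),
      f = (min (r : Int) (ps.length : Int) + 1 - jc).toNat →
      max 0 ((ps.length : Int) - ((us.length : Int) - (r : Int))) ≤ jc →
      jc ≤ min (r : Int) (ps.length : Int) + 1 →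
      pvInvCur us ps r jc cur → pvInvHmix us ps r jc H →
      pvInvCur us ps r (min (r : Int) (ps.length : Int) + 1)
        ((PySem.List.pyRange jc (min (r : Int) (ps.length : Int) + 1) 1).foldl
          (pvCell us ps (ps.length : Int) prev (r : Int)) (cur, H)).1 ∧
      pvInvHmix us ps r (min (r : Int) (ps.length : Int) + 1)
        ((PySem.List.pyRange jc (min (r : Int) (ps.length : Int) + 1) 1).foldl
          (pvCell us ps (ps.length : Int) prev (r : Int)) (cur, H)).2 := by
  intro f
  induction f with
  | zero =>
    intro jc cur H hf hlo hhi hcur hmix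
    have hnil : min (r : Int) (ps.length : Int) + 1 ≤ jc := by omega
    rw [PySem.List.pyRange_one_eq_nil hnil]
    have hjc : jc = min (r : Int) (ps.length : Int) + 1 := le_antisymm hhi hnil
    subst hjc
    exact ⟨hcur, hmix⟩
  | succ f ih =>
    intro jc cur H hf hlo hhi hcur hmix
    have hlt : jc < min (r : Int) (ps.length : Int) + 1 := by omega
    rw [PySem.List.pyRange_one_cons hlt, List.foldl_cons]
    have hjc0 : 0 ≤ jc := le_trans (le_max_left _ _) hlo
    have hjcn : jc = (jc.toNat : Int) := (Int.toNat_of_nonneg hjc0).symm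
    set jn := jc.toNat with hjn
    have hjnr : jn ≤ r := by omega
    have hjnk : jn ≤ ps.length := by omega
    by_cases hk : jc = (ps.length : Int)
    · -- the j == k column: cur[j] = 1, H untouched
      have hstep : pvCell us ps (ps.length : Int) prev (r : Int) (cur, H) jc
          = (PySem.Dict.insert cur jc 1, H) := by
        simp [pvCell, hk]
      rw [hstep]
      refine ih (jc + 1) _ _ (by omega) (by omega) (by omega) ?_ ?_
      · intro j
        rw [PySem.Dict.getD_insert]
        by_cases h1 : j = jc
        · subst h1
          rw [if_pos rfl, if_pos ⟨hlo, by omega⟩]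
          have hdk : ps.drop jn = [] := List.drop_eq_nil_of_le (by omega)
          rw [hdk, pvC_nil_pattern]
        · rw [if_neg h1, hcur j]
          by_cases hc : max 0 ((ps.length : Int) - ((us.length : Int) - (r : Int))) ≤ j ∧ j < jc
          · rw [if_pos hc, if_pos ⟨hc.1, by omega⟩]
          · rw [if_neg hc, if_neg (by omega)]
      · intro u j hjk hjr
        rw [hmix u j hjk hjr]
        by_cases hc : (j : Int) < jc
        · rw [if_pos hc, if_pos (by omega)]
        · rw [if_neg hc, if_neg (by omega)]
    · -- a real column jn < ps.length
      have hjklt : jn < ps.length := by omega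
      have hdropu : us.drop r = us[r] :: us.drop (r + 1) := List.drop_eq_getElem_cons hr
      have hdropp : ps.drop jn = ps[jn] :: ps.drop (jn + 1) := List.drop_eq_getElem_cons hjklt
      have hgetu : PySem.List.pyGetD us (r : Int) "" = us[r] := by
        rw [PySem.List.pyGetD_natCast]
        exact List.getD_eq_getElem us "" hr
      have hgetp : PySem.List.pyGetD ps jc "" = ps[jn] := by
        rw [hjcn, PySem.List.pyGetD_natCast]
        exact List.getD_eq_getElem ps "" hjklt
      have hprevj : PySem.Dict.getD prev jc 0 = pvC (us.drop (r + 1)) (ps.drop jn) := by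
        rw [hjcn]; exact hrow jn hjnk (by omega)
      have hprevj1 : PySem.Dict.getD prev (jc + 1) 0 = pvC (us.drop (r + 1)) (ps.drop (jn + 1)) := by
        have hc : jc + 1 = ((jn + 1 : Nat) : Int) := by omega
        rw [hc]; exact hrow (jn + 1) (by omega) (by omega)
      have hHold : PySem.Dict.getD H (us[r], jc) 0 = pvHC us[r] (us.drop (r + 1)) (ps.drop jn) := by
        rw [hjcn, hmix us[r] jn hjklt hjnr, if_neg (by omega)]
      by_cases hm : pvMatchB us[r] ps[jn] = true
      · have hstep : pvCell us ps (ps.length : Int) prev (r : Int) (cur, H) jc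
            = (PySem.Dict.insert cur jc
                 (PySem.Dict.getD prev jc 0 + PySem.Dict.getD prev (jc + 1) 0
                   - PySem.Dict.getD H (us[r], jc) 0),
               PySem.Dict.insert H (us[r], jc) (PySem.Dict.getD prev (jc + 1) 0)) := by
          simp [pvCell, hk, hgetu, hgetp, hm]
        rw [hstep]
        refine ih (jc + 1) _ _ (by omega) (by omega) (by omega) ?_ ?_
        · intro j
          rw [PySem.Dict.getD_insert]
          by_cases h1 : j = jc
          · subst h1
            rw [if_pos rfl, if_pos ⟨hlo, by omega⟩]
            rw [hprevj, hprevj1, hHold]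
            have hrec := pvC_cons_match us[r] ps[jn] (us.drop (r + 1)) (ps.drop (jn + 1)) hm
            rw [← hdropu, ← hdropp] at hrec
            rw [← hjn]
            omega
          · rw [if_neg h1, hcur j]
            by_cases hc : max 0 ((ps.length : Int) - ((us.length : Int) - (r : Int))) ≤ j ∧ j < jc
            · rw [if_pos hc, if_pos ⟨hc.1, by omega⟩]
            · rw [if_neg hc, if_neg (by omega)]
        · intro u j hjk hjr
          rw [PySem.Dict.getD_insert]
          by_cases h1 : (u, (j : Int)) = (us[r], jc)
          · have hu : u = us[r] := congrArg Prod.fst h1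
            have hj : j = jn := by
              have := congrArg Prod.snd h1
              simp only at this
              omega
            subst hu; subst hj
            rw [if_pos h1, if_pos (by omega), hprevj1]
            have hrec := pvHC_cons_match_self us[r] ps[jn] (us.drop (r + 1)) (ps.drop (jn + 1)) hm
            rw [← hdropu, ← hdropp] at hrec
            omega
          · rw [if_neg h1, hmix u j hjk hjr]
            by_cases hj : (j : Int) = jc
            · have hj' : j = jn := by omega
              subst hj'
              have hune : u ≠ us[r] := fun hu => h1 (by rw [hu, hjcn])
              have hrec := pvHC_cons_match_other u us[r] ps[jn]
                (us.drop (r + 1)) (ps.drop (jn + 1)) hm hune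
              rw [← hdropu, ← hdropp] at hrec
              rw [if_neg (by omega), if_pos (by omega)]
              omega
            · by_cases hc : (j : Int) < jc
              · rw [if_pos hc, if_pos (by omega)]
              · rw [if_neg hc, if_neg (by omega)]
      · have hm' : pvMatchB us[r] ps[jn] = false := by simpa using hm
        have hstep : pvCell us ps (ps.length : Int) prev (r : Int) (cur, H) jc
            = (PySem.Dict.insert cur jc (PySem.Dict.getD prev jc 0), H) := by
          simp [pvCell, hk, hgetu, hgetp, hm']
        rw [hstep]
        refine ih (jc + 1) _ _ (by omega) (by omega) (by omega) ?_ ?_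
        · intro j
          rw [PySem.Dict.getD_insert]
          by_cases h1 : j = jc
          · subst h1
            rw [if_pos rfl, if_pos ⟨hlo, by omega⟩, hprevj]
            have hrec := pvC_cons_not_match us[r] ps[jn] (us.drop (r + 1)) (ps.drop (jn + 1)) hm'
            rw [← hdropu, ← hdropp] at hrec
            rw [← hjn]
            omega
          · rw [if_neg h1, hcur j]
            by_cases hc : max 0 ((ps.length : Int) - ((us.length : Int) - (r : Int))) ≤ j ∧ j < jc
            · rw [if_pos hc, if_pos ⟨hc.1, by omega⟩]
            · rw [if_neg hc, if_neg (by omega)]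
        · intro u j hjk hjr
          rw [hmix u j hjk hjr]
          by_cases hj : (j : Int) = jc
          · have hj' : j = jn := by omega
            subst hj'
            have hrec := pvHC_cons_not_match u us[r] ps[jn]
              (us.drop (r + 1)) (ps.drop (jn + 1)) hm'
            rw [← hdropu, ← hdropp] at hrec
            rw [if_neg (by omega), if_pos (by omega)]
            omega
          · by_cases hc : (j : Int) < jc
            · rw [if_pos hc, if_pos (by omega)]
            · rw [if_neg hc, if_neg (by omega)]

theorem pv_row_step (us ps : List String) (r : Nat) (hr : r < us.length)
    (st : PySem.Dict Int Int × PySem.Dict (String × Int) Int)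
    (hrow : pvInvRow us ps (r + 1) st.1) (hH : pvInvH us ps (r + 1) st.2) :
    pvInvRow us ps r (pvRowStep us ps us.length ps.length st (r : Int)).1 ∧
    pvInvH us ps r (pvRowStep us ps us.length ps.length st (r : Int)).2 := by
  have hlen_dr : (us.drop r).length = us.length - r := List.length_drop
  by_cases hband : max 0 ((ps.length : Int) - ((us.length : Int) - (r : Int)))
      ≤ min (r : Int) (ps.length : Int) + 1
  case neg =>
    -- the band is empty (more patterns than users remain): no column is feasible
    have hfold : pvRowStep us ps us.length ps.length st (r : Int)
        = ((PySem.List.pyRange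
              (max 0 ((ps.length : Int) - ((us.length : Int) - (r : Int))))
              (min (r : Int) (ps.length : Int) + 1) 1).foldl
            (pvCell us ps (ps.length : Int) st.1 (r : Int)) (PySem.Dict.empty, st.2)) := rfl
    rw [hfold, PySem.List.pyRange_one_eq_nil (by omega), List.foldl_nil]
    constructor
    · intro j hjk hjr
      rw [PySem.Dict.getD_empty,
        pvC_short (us.drop r) (ps.drop j) (by simp [List.length_drop]; omega)]
    · intro u j hjk hjr
      rw [hH u j hjk (by omega),
        pvHC_short u (us.drop (r + 1)) (ps.drop j) (by simp [List.length_drop]; omega),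
        pvHC_short u (us.drop r) (ps.drop j) (by simp [List.length_drop]; omega)]
  case pos =>
  have hmain := pv_inner us ps r hr st.1 hrow
    ((min (r : Int) (ps.length : Int) + 1
      - max 0 ((ps.length : Int) - ((us.length : Int) - (r : Int)))).toNat)
    (max 0 ((ps.length : Int) - ((us.length : Int) - (r : Int))))
    PySem.Dict.empty st.2 rfl (le_refl _) (by omega)
    (by
      intro j
      rw [PySem.Dict.getD_empty, if_neg (by omega)])
    (by
      intro u j hjk hjr
      rw [hH u j hjk (by omega)]
      by_cases hc : (j : Int) < max 0 ((ps.length : Int) - ((us.length : Int) - (r : Int)))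
      · rw [if_pos hc,
          pvHC_short u (us.drop r) (ps.drop j) (by simp [List.length_drop]; omega),
          pvHC_short u (us.drop (r + 1)) (ps.drop j) (by simp [List.length_drop]; omega)]
      · rw [if_neg hc])
  have hfold : pvRowStep us ps us.length ps.length st (r : Int)
      = ((PySem.List.pyRange
            (max 0 ((ps.length : Int) - ((us.length : Int) - (r : Int))))
            (min (r : Int) (ps.length : Int) + 1) 1).foldl
          (pvCell us ps (ps.length : Int) st.1 (r : Int)) (PySem.Dict.empty, st.2)) := rfl
  rw [hfold]
  rcases hmain with ⟨hcur, hmix⟩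
  constructor
  · intro j hjk hjr
    rw [hcur (j : Int)]
    by_cases hc : (j : Int) < max 0 ((ps.length : Int) - ((us.length : Int) - (r : Int)))
    · rw [if_neg (by omega)]
      rw [pvC_short (us.drop r) (ps.drop j) (by simp [List.length_drop]; omega)]
    · rw [if_pos ⟨by omega, by omega⟩]
      simp
  · intro u j hjk hjr
    rw [hmix u j hjk hjr, if_pos (by omega)]

theorem pv_run_from (us ps : List String) : ∀ (r : Nat), r ≤ us.length →
    ∀ (st : PySem.Dict Int Int × PySem.Dict (String × Int) Int),
    pvInvRow us ps r st.1 → pvInvH us ps r st.2 →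
    pvInvRow us ps 0
      ((PySem.List.pyRange ((r : Int) - 1) (-1) (-1)).foldl
        (pvRowStep us ps us.length ps.length) st).1 := by
  intro r
  induction r with
  | zero =>
    intro _ st hrow _
    rw [show ((0 : Nat) : Int) - 1 = -1 by omega, PySem.List.pyRange_neg_one_eq_nil (le_refl _)]
    exact hrow
  | succ r ih =>
    intro hle st hrow hH
    have hcast : ((r + 1 : Nat) : Int) - 1 = (r : Int) := by push_cast; ring
    rw [hcast, PySem.List.pyRange_neg_one_cons (by omega), List.foldl_cons]
    have hstep := pv_row_step us ps r (by omega) st hrow hH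
    exact ih (by omega) _ hstep.1 hstep.2

theorem pv_alt_eq_card (us ps : List String) : solution_alt us ps = pvC us ps := by
  have hrow0 : pvInvRow us ps us.length
      (PySem.Dict.insert PySem.Dict.empty (ps.length : Int) 1) := by
    intro j hjk hjr
    rw [PySem.Dict.getD_insert]
    by_cases h1 : (j : Int) = (ps.length : Int)
    · rw [if_pos h1]
      have hj : j = ps.length := by omega
      subst hj
      rw [List.drop_length, List.drop_length, pvC_nil_pattern]
    · rw [if_neg h1, PySem.Dict.getD_empty,
        pvC_short (us.drop us.length) (ps.drop j) (by simp [List.length_drop]; omega)]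
  have hH0 : pvInvH us ps us.length PySem.Dict.empty := by
    intro u j hjk _
    rw [PySem.Dict.getD_empty]
    have hdropp : ps.drop j = ps[j] :: ps.drop (j + 1) := List.drop_eq_getElem_cons hjk
    rw [List.drop_length, hdropp]
    rfl
  have hfin := pv_run_from us ps us.length (le_refl _)
    (PySem.Dict.insert PySem.Dict.empty (ps.length : Int) 1, PySem.Dict.empty) hrow0 hH0
  have h0 := hfin 0 (Nat.zero_le _) (Nat.zero_le _)
  simp only [List.drop_zero, Nat.cast_zero] at h0
  simp only [solution_alt, PySem.List.len_eq]
  exact h0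

-- ===== VERDICT (by name: the statement is the Claim_ definition above) =====
theorem solution_spec : Claim_equal_solution := by
  intro user_id banned_id _
  unfold Spec_solution
  have hsol : solution user_id banned_id =
      ((((pvCombinations user_id banned_id.length).foldl (pvStepA banned_id)
        (PySem.Set.empty, 0)).1.length : Nat) : Int) := rfl
  rw [hsol, pv_foldA, pv_alt_eq_card]
  have hperm : List.Perm
      (((pvCombinations user_id banned_id.length).filter
          (fun c => isBanned c banned_id)).foldl (fun r t => PySem.Set.add r t)
        (PySem.Set.empty : PySem.Set (List String)))
      (pvS user_id banned_id) := by
    rw [List.perm_ext_iff_of_nodup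
      (pv_nodup_foldl_add_id _ _ (by simp [PySem.Set.empty])) (pv_nodup_S _ _)]
    intro x
    rw [pv_mem_foldl_add_id, pv_mem_S]
    simp [PySem.Set.empty, List.mem_filter]
  exact congrArg Nat.cast hperm.length_eq
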